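-- pv_equiv track=rewrite | github.com/Siya96/Algortihms_2.2 | Onmaxproduct.py | dumb_rec_incremental
-- ===== SOURCE A (Python) =====
-- def dumb_rec_incremental(arr):      # O(n)
--     if len(arr) == 1:
--         return arr[0], arr[0]
--
--     previous = dumb_rec_incremental(arr[:-1])
--     prev_max_at = previous[0]
--     last_element = arr[-1]
--
--     max_at = max(last_element, last_element*prev_max_at)
--     max_value = max(previous[1], max_at)
--
--     return max_at, max_value
-- ===== SOURCE B (Python) =====
-- def dumb_rec_incremental(arr):
--     # single forward pass, no slicing, no recursion
--     max_at = max_value = arr[0]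
--     for x in arr[1:]:
--         max_at = max(x, x * max_at)
--         if max_at > max_value:
--             max_value = max_at
--     return max_at, max_value
-- ===== Notes on version B (the rewrite author's own statement) =====
-- stated objective: faster
-- what changed: Replaced the recursion that copies arr[:-1] at every level with a single forward loop keeping (max_at, max_value) incrementally.
import Mathlib
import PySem

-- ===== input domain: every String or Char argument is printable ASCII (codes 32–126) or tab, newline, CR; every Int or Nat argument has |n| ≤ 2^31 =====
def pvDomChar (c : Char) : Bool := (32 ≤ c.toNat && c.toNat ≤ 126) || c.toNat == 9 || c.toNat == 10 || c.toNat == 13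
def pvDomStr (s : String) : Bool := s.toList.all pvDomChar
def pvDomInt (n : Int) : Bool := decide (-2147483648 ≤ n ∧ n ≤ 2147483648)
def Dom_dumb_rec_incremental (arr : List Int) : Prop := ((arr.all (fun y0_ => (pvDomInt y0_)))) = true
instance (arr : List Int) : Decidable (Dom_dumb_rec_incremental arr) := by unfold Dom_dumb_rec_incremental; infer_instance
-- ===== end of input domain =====

-- B replaces A's recursion (which copies arr[:-1] at every level) by one forward loop
-- keeping (max_at, max_value) incrementally: O(n) instead of O(n^2).  Objective: faster.
-- A's Python returns a pair; per the task signature both ports return it as a two-element list.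

-- ===== PORT A =====
-- literal transliteration of A; on [] the Python recurses forever (RecursionError),
-- excluded by Pre_, so the port returns [] there only to be total.
def dumb_rec_incremental (arr : List Int) : List Int :=
  if arr.length = 1 then
    [(PySem.List.pyGet? arr 0).getD 0, (PySem.List.pyGet? arr 0).getD 0]
  else if arr.length = 0 then []
  else
    let previous := dumb_rec_incremental (PySem.List.slice arr none (some (-1)))
    let prev_max_at := (PySem.List.pyGet? previous 0).getD 0
    let last_element := (PySem.List.pyGet? arr (-1)).getD 0
    let max_at := max last_element (last_element * prev_max_at)
    let max_value := max ((PySem.List.pyGet? previous 1).getD 0) max_at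
    [max_at, max_value]
termination_by arr.length
decreasing_by simp [PySem.List.slice_to_neg_one, List.length_dropLast]; omega

-- ===== PORT B =====
-- the loop body of Source B: one step of the incremental (max_at, max_value) update
def pvStep (s : Int × Int) (x : Int) : Int × Int :=
  let ma := max x (x * s.1)
  (ma, if ma > s.2 then ma else s.2)

def dumb_rec_incremental_alt (arr : List Int) : List Int :=
  match arr with
  | [] => []   -- Source B raises IndexError on []; outside Pre_
  | x :: xs =>
    let p := xs.foldl pvStep (x, x)
    [p.1, p.2]

-- ===== PRECONDITION & SPEC =====
-- Pre_ excludes only the empty list, where A never returns (RecursionError).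
def Pre_dumb_rec_incremental (arr : List Int) : Prop := arr ≠ []
instance (arr : List Int) : Decidable (Pre_dumb_rec_incremental arr) := by unfold Pre_dumb_rec_incremental; infer_instance
def pvWitness_dumb_rec_incremental : List Int := ([2, -3, 4])

def Spec_dumb_rec_incremental (arr : List Int) (out : List Int) : Prop := out = dumb_rec_incremental_alt arr
instance (arr : List Int) (out : List Int) : Decidable (Spec_dumb_rec_incremental arr out) := by unfold Spec_dumb_rec_incremental; infer_instance

-- ===== CLAIM (what is proved, stated in full; the proofs are below) =====
def Claim_equal_dumb_rec_incremental : Prop := ∀ (arr : List Int), Dom_dumb_rec_incremental arr → Pre_dumb_rec_incremental arr → Spec_dumb_rec_incremental arr (dumb_rec_incremental arr)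

-- ===== LEMMAS AND PROOFS =====

-- Python's max(b, a) equals the loop's strict-comparison update
lemma if_le_eq_if_lt (a b : Int) : (if b ≤ a then a else b) = (if b < a then a else b) := by
  split_ifs <;> omega

-- B on a snoc: the fold extends by one pvStep
lemma altPair_snoc (x : Int) (xs : List Int) (y : Int) :
    (xs ++ [y]).foldl pvStep (x, x) = pvStep (xs.foldl pvStep (x, x)) y := by
  simp [List.foldl_append]

-- A on a snoc with nonempty prefix
lemma A_snoc (ys : List Int) (y : Int) (h : ys ≠ []) :
    dumb_rec_incremental (ys ++ [y]) =
      let prev := dumb_rec_incremental ys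
      let a := (PySem.List.pyGet? prev 0).getD 0
      let b := (PySem.List.pyGet? prev 1).getD 0
      let ma := max y (y * a)
      [ma, max b ma] := by
  rw [dumb_rec_incremental]
  have hlen : (ys ++ [y]).length = ys.length + 1 := by simp
  have h0 : 0 < ys.length := List.length_pos_iff.mpr h
  rw [if_neg (by omega), if_neg (by omega)]
  have hslice : PySem.List.slice (ys ++ [y]) none (some (-1)) = ys := by
    rw [PySem.List.slice_to_neg_one]; simp
  have hlast : PySem.List.pyGet? (ys ++ [y]) (-1) = some y := by
    simp [PySem.List.pyGet?, PySem.List.pyIdx?]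
  rw [hslice, hlast]
  simp

lemma main_lemma : ∀ (ys : List Int), ys ≠ [] →
    dumb_rec_incremental ys = dumb_rec_incremental_alt ys := by
  intro ys
  induction ys using List.reverseRecOn with
  | nil => intro h; exact absurd rfl h
  | append_singleton zs y ih =>
    intro _
    cases hz : zs with
    | nil =>
      subst hz
      simp [dumb_rec_incremental, dumb_rec_incremental_alt, PySem.List.pyGet?,
        PySem.List.pyIdx?]
    | cons x xs =>
      subst hz
      rw [A_snoc (x :: xs) y (by simp), ih (by simp)]
      simp only [dumb_rec_incremental_alt, List.cons_append, altPair_snoc]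
      simp [pvStep, PySem.List.pyGet?, PySem.List.pyIdx?, max_def]
      exact if_le_eq_if_lt _ _

-- ===== VERDICT (by name: the statement is the Claim_ definition above) =====
theorem dumb_rec_incremental_spec : Claim_equal_dumb_rec_incremental := by
  intro arr _ hpre
  unfold Spec_dumb_rec_incremental
  exact main_lemma arr hpre
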